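-- pv_equiv track=rewrite | github.com/aLittlecrocodile/RapidRAR | src/utils.py | calculate_work_division
-- ===== SOURCE A (Python) =====
-- def calculate_work_division(total_combinations, num_gpus):
--     """
--     计算工作在多个GPU之间的分配
--
--     Args:
--         total_combinations: 总组合数
--         num_gpus: GPU数量
--
--     Returns:
--         每个GPU的工作区间列表 [(start1, end1), (start2, end2), ...]
--     """
--     base_size = total_combinations // num_gpus
--     remainder = total_combinations % num_gpus
--
--     divisions = []
--     start = 0
--
--     for i in range(num_gpus):
--         # 前remainder个GPU多分配一个任务
--         size = base_size + (1 if i < remainder else 0)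
--         end = start + size
--         divisions.append((start, end))
--         start = end
--
--     return divisions
-- ===== SOURCE B (Python) =====
-- def calculate_work_division(total_combinations, num_gpus):
--     base_size = total_combinations // num_gpus
--     remainder = total_combinations % num_gpus
--     return [(i * base_size + min(i, remainder),
--              (i + 1) * base_size + min(i + 1, remainder))
--             for i in range(num_gpus)]
-- ===== Notes on version B (the rewrite author's own statement) =====
-- stated objective: simpler
-- what changed: Replaces the loop carrying a running 'start' accumulator with a stateless comprehension computing each interval's boundaries in closed form from its index (i*base+min(i,remainder)).
import Mathlib
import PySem

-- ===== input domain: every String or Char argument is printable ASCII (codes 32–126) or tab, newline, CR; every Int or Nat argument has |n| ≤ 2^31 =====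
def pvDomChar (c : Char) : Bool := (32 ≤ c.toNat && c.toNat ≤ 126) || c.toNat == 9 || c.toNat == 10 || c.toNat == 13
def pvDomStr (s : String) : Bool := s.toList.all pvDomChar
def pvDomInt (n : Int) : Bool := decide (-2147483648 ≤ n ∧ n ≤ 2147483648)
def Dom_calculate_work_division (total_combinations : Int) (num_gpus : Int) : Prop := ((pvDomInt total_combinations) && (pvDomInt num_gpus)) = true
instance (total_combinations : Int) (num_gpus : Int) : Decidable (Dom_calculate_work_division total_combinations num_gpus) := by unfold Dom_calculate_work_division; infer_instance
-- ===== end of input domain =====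

-- B replaces A's running 'start' accumulator with a stateless closed-form interval per index (simpler decomposition, same cost).


-- ===== PORT A =====
def calculate_work_division (total_combinations : Int) (num_gpus : Int) : List (Int × Int) :=
  ((PySem.List.pyRange 0 num_gpus 1).foldl
    (fun (acc : List (Int × Int) × Int) i =>
      ((acc.1 ++ [(acc.2, acc.2 + (PySem.Int.floordiv total_combinations num_gpus + (if i < PySem.Int.mod total_combinations num_gpus then 1 else 0)))]),
       acc.2 + (PySem.Int.floordiv total_combinations num_gpus + (if i < PySem.Int.mod total_combinations num_gpus then 1 else 0))))
    ([], 0)).1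

-- ===== PORT B =====
def calculate_work_division_alt (total_combinations : Int) (num_gpus : Int) : List (Int × Int) :=
  (PySem.List.pyRange 0 num_gpus 1).map
    (fun i => (i * PySem.Int.floordiv total_combinations num_gpus + min i (PySem.Int.mod total_combinations num_gpus),
               (i + 1) * PySem.Int.floordiv total_combinations num_gpus + min (i + 1) (PySem.Int.mod total_combinations num_gpus)))

-- ===== PRECONDITION & SPEC =====
-- Pre_ excludes num_gpus = 0, where Python A raises ZeroDivisionError.
def Pre_calculate_work_division (total_combinations : Int) (num_gpus : Int) : Prop := num_gpus ≠ 0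
instance (total_combinations : Int) (num_gpus : Int) : Decidable (Pre_calculate_work_division total_combinations num_gpus) := by unfold Pre_calculate_work_division; infer_instance
def pvWitness_calculate_work_division : Int × Int := (10, 3)

def Spec_calculate_work_division (total_combinations : Int) (num_gpus : Int) (out : List (Int × Int)) : Prop := out = calculate_work_division_alt total_combinations num_gpus
instance (total_combinations : Int) (num_gpus : Int) (out : List (Int × Int)) : Decidable (Spec_calculate_work_division total_combinations num_gpus out) := by unfold Spec_calculate_work_division; infer_instance

-- ===== CLAIM (what is proved, stated in full; the proofs are below) =====
def Claim_equal_calculate_work_division : Prop := ∀ (total_combinations : Int) (num_gpus : Int), Dom_calculate_work_division total_combinations num_gpus → Pre_calculate_work_division total_combinations num_gpus → Spec_calculate_work_division total_combinations num_gpus (calculate_work_division total_combinations num_gpus)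

-- ===== LEMMAS AND PROOFS =====

-- Loop invariant: after folding over range(0, m), the accumulated list is the closed-form
-- map and the carried start equals m*base + min m r (needs 0 ≤ r).
theorem cwd_loop (base r : Int) (hr : 0 ≤ r) (m : Nat) :
    (PySem.List.pyRange 0 (m : Int) 1).foldl
      (fun (acc : List (Int × Int) × Int) i =>
        ((acc.1 ++ [(acc.2, acc.2 + (base + (if i < r then 1 else 0)))]),
         acc.2 + (base + (if i < r then 1 else 0))))
      ([], 0)
    = ((PySem.List.pyRange 0 (m : Int) 1).map
        (fun i => (i * base + min i r, (i + 1) * base + min (i + 1) r)),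
       (m : Int) * base + min (m : Int) r) := by
  induction m with
  | zero => simp [PySem.List.pyRange_one_eq_nil]; omega
  | succ k ih =>
    have h : ((k : Int) + 1) = ((k + 1 : Nat) : Int) := by push_cast; ring
    have hsplit := PySem.List.pyRange_one_succ_right (a := 0) (b := (k : Int)) (by positivity)
    rw [← h, hsplit, List.foldl_append, List.map_append, ih]
    simp only [List.foldl_cons, List.foldl_nil, List.map_cons, List.map_nil]
    have key : min ((k : Int)) r + (if (k : Int) < r then 1 else 0) = min ((k : Int) + 1) r := by
      split_ifs with hk <;> omega
    have h2 : (k : Int) * base + min ((k : Int)) r + (base + (if (k : Int) < r then 1 else 0))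
        = ((k : Int) + 1) * base + min ((k : Int) + 1) r := by rw [← key]; ring
    rw [h2]

-- ===== VERDICT (by name: the statement is the Claim_ definition above) =====
theorem calculate_work_division_spec : Claim_equal_calculate_work_division := by
  intro t n _ hn
  unfold Spec_calculate_work_division calculate_work_division calculate_work_division_alt
  by_cases h0 : n ≤ 0
  · simp [PySem.List.pyRange_one_eq_nil h0]
  · push Not at h0
    obtain ⟨m, hm⟩ : ∃ m : Nat, n = (m : Int) := ⟨n.toNat, by omega⟩
    subst hm
    have hr : 0 ≤ PySem.Int.mod t (m : Int) := PySem.Int.mod_nonneg (a := t) h0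
    rw [cwd_loop (PySem.Int.floordiv t (m : Int)) (PySem.Int.mod t (m : Int)) hr m]
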